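-- pv_equiv track=rewrite | github.com/krzysztof-turowski/programming-contests | google-code-jam/2020-round-2/wormhole_in_one.py | solve
-- ===== SOURCE A (Python) =====
-- from collections import defaultdict
--
-- def get_lines(L, N):
--     V, D = list(range(N)), defaultdict(int)
--     for i, j in L:
--         if V[i] != V[j]:
--             D[i] += 1
--         V[j] = V[i]
--     out = [N - sum(D.values()) - len(D), 0, 0]
--     for line in D.values():
--         line += 1
--         if line % 2 == 1:
--             out[1] += (line - 3) // 2
--             out[2] += 1
--         else:
--             out[1] += line // 2
--     return out
--
-- def solve(P):
--     def nwd(a, b):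
--         if a < b:
--             a, b = b, a
--         while b > 0:
--             a, b = b, a % b
--         return a
--     def get_direction(u, v):
--         if u[0] == v[0]:
--             return (0, 1)
--         if u[1] == v[1]:
--             return (1, 0)
--         if u[0] < v[0]:
--             u, v = v, u
--         d = nwd(abs(u[0] - v[0]), abs(u[1] - v[1]))
--         return ((u[0] - v[0]) // d, (u[1] - v[1]) // d)
--     D = defaultdict(list)
--     for i, u in enumerate(P):
--         for j, v in enumerate(P):
--             if i >= j:
--                 continue
--             D[get_direction(u, v)].append((i, j))
--     out = 1
--     for L in D.values():
--         S = get_lines(L, len(P))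
--         if S[2] % 2 == 1:
--             out = max(out, (S[0] > 0) + 3 * S[2] + 2 * S[1])
--         else:
--             out = max(out, (S[0] > 0) + 3 * S[2] + 2 * S[1] + (S[0] > 1))
--     return out
-- ===== SOURCE B (Python) =====
-- def solve(P):
--     def gcd(a, b):
--         return a if b == 0 else gcd(b, a % b)
--     n = len(P)
--     groups = {}  # direction -> {line offset key -> set of point indices}
--     for i in range(n):
--         xi, yi = P[i]
--         for j in range(i + 1, n):
--             xj, yj = P[j]
--             if xi == xj:
--                 d = (0, 1)
--             elif yi == yj:
--                 d = (1, 0)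
--             elif xi > xj:
--                 g = gcd(abs(xi - xj), abs(yi - yj))
--                 d = ((xi - xj) // g, (yi - yj) // g)
--             else:
--                 g = gcd(abs(xj - xi), abs(yj - yi))
--                 d = ((xj - xi) // g, (yj - yi) // g)
--             key = d[0] * yi - d[1] * xi
--             lines = groups.setdefault(d, {})
--             s = lines.setdefault(key, set())
--             s.add(i)
--             s.add(j)
--     best = 1
--     for lines in groups.values():
--         covered = 0
--         odd = 0
--         half = 0
--         for s in lines.values():
--             m = len(s)
--             covered += m
--             if m % 2 == 1:
--                 odd += 1
--                 half += (m - 3) // 2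
--             else:
--                 half += m // 2
--         free = n - covered
--         score = (free > 0) + 3 * odd + 2 * half
--         if odd % 2 == 0:
--             score += (free > 1)
--         best = max(best, score)
--     return best
-- ===== Notes on version B (the rewrite author's own statement) =====
-- stated objective: alternative
-- what changed: B drops A's get_lines chain-union over buckets of index pairs entirely: it groups, per canonical direction, the endpoints of each same-direction pair into sets keyed by the line offset dx*y-dy*x, and reads the collinear-line sizes off the set sizes before applying the identical parity score formula.
-- outside the precondition, e.g. on solve([(0, 0), (0, 0), (1, 0)]): A returns 4, B returns 3
import Mathlib
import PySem

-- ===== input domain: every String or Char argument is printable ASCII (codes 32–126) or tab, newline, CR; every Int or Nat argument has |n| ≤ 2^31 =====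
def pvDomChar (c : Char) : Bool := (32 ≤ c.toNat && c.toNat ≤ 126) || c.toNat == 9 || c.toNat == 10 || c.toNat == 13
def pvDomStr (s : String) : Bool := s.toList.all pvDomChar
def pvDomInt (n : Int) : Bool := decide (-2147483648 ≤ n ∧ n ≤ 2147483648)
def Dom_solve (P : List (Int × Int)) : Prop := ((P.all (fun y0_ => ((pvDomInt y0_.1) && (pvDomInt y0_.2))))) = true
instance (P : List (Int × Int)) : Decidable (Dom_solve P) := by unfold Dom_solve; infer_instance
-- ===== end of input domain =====

-- B replaces A's per-direction pair buckets + get_lines chain-union by dicts of line-offset-keyed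
-- index sets per direction, reading line sizes off set sizes (alternative algorithm, same cost).


-- ===== PORT A =====

-- while b > 0: a, b = b, a % b   (Python % → PySem.Int.mod)
def nwdLoop (a b : Int) : Int :=
  if 0 < b then nwdLoop b (PySem.Int.mod a b) else a
termination_by b.toNat
decreasing_by
  rename_i h
  have h1 := PySem.Int.mod_nonneg a h
  have h2 := PySem.Int.mod_lt a h
  omega

def nwd (a b : Int) : Int :=
  if a < b then nwdLoop b a else nwdLoop a b

def getDirection (u v : Int × Int) : Int × Int :=
  if u.1 = v.1 then (0, 1)
  else if u.2 = v.2 then (1, 0)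
  else
    let uv := if u.1 < v.1 then (v, u) else (u, v)
    let d := nwd |uv.1.1 - uv.2.1| |uv.1.2 - uv.2.2|
    (PySem.Int.floordiv (uv.1.1 - uv.2.1) d, PySem.Int.floordiv (uv.1.2 - uv.2.2) d)

-- get_lines(L, N); Python's result list [a, b, c] is ported as the triple (a, b, c).
-- The V[i] / V[j] reads and the V[j] = V[i] write use the total pyGetD / pySetD forms:
-- at every call site inside solve the indices are in range, where they are exact.
def getLines (L : List (Int × Int)) (N : Int) : Int × Int × Int :=
  let st := L.foldl
    (fun (st : List Int × PySem.Dict Int Int) ij =>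
      let vi := PySem.List.pyGetD st.1 ij.1 0
      let vj := PySem.List.pyGetD st.1 ij.2 0
      let D := if vi ≠ vj then st.2.modify ij.1 0 (· + 1) else st.2
      (PySem.List.pySetD st.1 ij.2 vi, D))
    (PySem.List.pyRange 0 N 1, PySem.Dict.empty)
  let D := st.2
  let o12 := D.values.foldl
    (fun (acc : Int × Int) line0 =>
      let line := line0 + 1
      if PySem.Int.mod line 2 = 1 then
        (acc.1 + PySem.Int.floordiv (line - 3) 2, acc.2 + 1)
      else
        (acc.1 + PySem.Int.floordiv line 2, acc.2))
    (0, 0)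
  (N - D.values.sum - D.size, o12.1, o12.2)

def solve (P : List (Int × Int)) : Int :=
  let D := (PySem.List.enumerate P).foldl
    (fun D iu =>
      (PySem.List.enumerate P).foldl
        (fun (D : PySem.Dict (Int × Int) (List (Int × Int))) jv =>
          if iu.1 ≥ jv.1 then D
          else D.modify (getDirection iu.2 jv.2) [] (· ++ [(iu.1, jv.1)]))
        D)
    PySem.Dict.empty
  D.values.foldl
    (fun out L =>
      let S := getLines L P.length
      if PySem.Int.mod S.2.2 2 = 1 then
        max out ((if S.1 > 0 then (1 : Int) else 0) + 3 * S.2.2 + 2 * S.2.1)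
      else
        max out ((if S.1 > 0 then (1 : Int) else 0) + 3 * S.2.2 + 2 * S.2.1 +
                 (if S.1 > 1 then (1 : Int) else 0)))
    1

-- ===== PORT B =====

def gcdB (a b : Int) : Int :=
  if h : b = 0 then a else gcdB b (PySem.Int.mod a b)
termination_by b.natAbs
decreasing_by
  rcases lt_or_gt_of_ne h with hb | hb
  · have := PySem.Int.mod_neg_bounds a hb; omega
  · have h1 := PySem.Int.mod_nonneg a hb
    have h2 := PySem.Int.mod_lt a hb
    omega

-- canonical direction of the segment u-v, as Source B computes it
def dirB (u v : Int × Int) : Int × Int :=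
  if u.1 = v.1 then (0, 1)
  else if u.2 = v.2 then (1, 0)
  else if u.1 > v.1 then
    let g := gcdB |u.1 - v.1| |u.2 - v.2|
    (PySem.Int.floordiv (u.1 - v.1) g, PySem.Int.floordiv (u.2 - v.2) g)
  else
    let g := gcdB |v.1 - u.1| |v.2 - u.2|
    (PySem.Int.floordiv (v.1 - u.1) g, PySem.Int.floordiv (v.2 - u.2) g)

def solve_alt (P : List (Int × Int)) : Int :=
  let n : Int := P.length
  let G := (PySem.List.pyRange 0 n 1).foldl
    (fun (G : PySem.Dict (Int × Int) (PySem.Dict Int (PySem.Set Int))) i =>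
      (PySem.List.pyRange (i + 1) n 1).foldl
        (fun G j =>
          let u := PySem.List.pyGetD P i ((0 : Int), (0 : Int))  -- i, j always in range here
          let v := PySem.List.pyGetD P j ((0 : Int), (0 : Int))
          let d := dirB u v
          let key := d.1 * u.2 - d.2 * u.1
          let lines := G.getD d PySem.Dict.empty
          let s := lines.getD key PySem.Set.empty
          G.insert d (lines.insert key (PySem.Set.add (PySem.Set.add s i) j)))
        G)
    PySem.Dict.empty
  G.values.foldl
    (fun best lines =>
      let t := lines.values.foldl
        (fun (t : Int × Int × Int) s =>
          let m : Int := s.length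
          if PySem.Int.mod m 2 = 1 then
            (t.1 + m, t.2.1 + 1, t.2.2 + PySem.Int.floordiv (m - 3) 2)
          else
            (t.1 + m, t.2.1, t.2.2 + PySem.Int.floordiv m 2))
        (0, 0, 0)
      let free := n - t.1
      let score := (if free > 0 then (1 : Int) else 0) + 3 * t.2.1 + 2 * t.2.2
      let score := if PySem.Int.mod t.2.1 2 = 0 then score + (if free > 1 then 1 else 0) else score
      max best score)
    1

-- ===== PRECONDITION & SPEC =====

-- Pre_ excludes lists with duplicate points: there coincident points pair only as vertical, and
-- A's chain-union accidentally splits a non-vertical collinear line into several pieces — a corner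
-- the original problem (distinct golf-ball positions) never specifies.
def Pre_solve (P : List (Int × Int)) : Prop := P.Nodup
instance (P : List (Int × Int)) : Decidable (Pre_solve P) := by unfold Pre_solve; infer_instance

def pvWitness_solve : (List (Int × Int)) := [(0, 0), (1, 1), (0, 1)]

def Spec_solve (P : List (Int × Int)) (out : Int) : Prop := out = solve_alt P
instance (P : List (Int × Int)) (out : Int) : Decidable (Spec_solve P out) := by unfold Spec_solve; infer_instance

-- ===== CLAIM (what is proved, stated in full; the proofs are below) =====
def Claim_equal_solve : Prop := ∀ (P : List (Int × Int)), Dom_solve P → Pre_solve P → Spec_solve P (solve P)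

-- ===== LEMMAS AND PROOFS =====

-- All helper definitions below are proof-side only.

def pvPt (P : List (Int × Int)) (k : Nat) : Int × Int := PySem.List.pyGetD P (k : Int) (0, 0)

def pvDirIdx (P : List (Int × Int)) (p : Nat × Nat) : Int × Int := getDirection (pvPt P p.1) (pvPt P p.2)

def pvLex (n : Nat) : List (Nat × Nat) :=
  (List.range n).flatMap (fun i => ((List.range n).filter (fun j => decide (i < j))).map (fun j => (i, j)))

def pvLexLT (p q : Nat × Nat) : Prop := p.1 < q.1 ∨ (p.1 = q.1 ∧ p.2 < q.2)

def pvK (d : Int × Int) (P : List (Int × Int)) (k : Nat) : Int := d.1 * (pvPt P k).2 - d.2 * (pvPt P k).1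

def pvFlt (n : Nat) (K : Nat → Int) : List (Nat × Nat) := (pvLex n).filter (fun p => K p.1 == K p.2)

def pvCls (n : Nat) (K : Nat → Int) (i : Nat) : List Nat := (List.range n).filter (fun j => K j == K i)

def pvMn (n : Nat) (K : Nat → Int) (i : Nat) : Nat := (pvCls n K i).headD i

def pvCnt (n : Nat) (K : Nat → Int) (m : Nat) : Nat := (pvCls n K m).length

def pvActive (n : Nat) (K : Nat → Int) : List Nat :=
  (List.range n).filter (fun m => pvMn n K m == m && decide (2 ≤ pvCnt n K m))

def pvCanon (d : Int × Int) : Prop :=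
  d = (0, 1) ∨ d = (1, 0) ∨ (0 < d.1 ∧ d.2 ≠ 0 ∧ Int.gcd d.1 d.2 = 1)

-- A's get_lines fold step
def pvStepA (st : List Int × PySem.Dict Int Int) (ij : Int × Int) : List Int × PySem.Dict Int Int :=
  let vi := PySem.List.pyGetD st.1 ij.1 0
  let vj := PySem.List.pyGetD st.1 ij.2 0
  let D := if vi ≠ vj then st.2.modify ij.1 0 (· + 1) else st.2
  (PySem.List.pySetD st.1 ij.2 vi, D)

-- state V after processing prefix l
def pvVst (n : Nat) (K : Nat → Int) (l : List (Nat × Nat)) : List Int :=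
  (List.range n).map (fun x => if l.any (fun q => q.2 == x) then ((pvMn n K x : Nat) : Int) else (x : Int))

-- order-free characterisation of A's D after processing prefix l
def pvInv (n : Nat) (K : Nat → Int) (l : List (Nat × Nat)) (st : List Int × PySem.Dict Int Int) : Prop :=
  st.1 = pvVst n K l ∧ st.2.keys.Nodup ∧
  (∀ m : Nat, st.2.get? (m : Int) =
      if pvMn n K m = m ∧ 0 < l.countP (fun p => p.1 == m)
      then some ((l.countP (fun p => p.1 == m) : Nat) : Int) else none) ∧
  (∀ x : Int, x < 0 → st.2.get? x = none)

def pvDirs (P : List (Int × Int)) : List (Int × Int) :=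
  PySem.Set.ofList ((pvLex P.length).map (pvDirIdx P))

def pvIp (p : Nat × Nat) : Int × Int := ((p.1 : Int), (p.2 : Int))

def pvInner (P : List (Int × Int)) (d : Int × Int) : PySem.Dict Int (PySem.Set Int) :=
  ((pvLex P.length).filter (fun p => pvDirIdx P p == d)).foldl
    (fun lines p => lines.modify (pvK d P p.1) PySem.Set.empty
      (fun s => PySem.Set.add (PySem.Set.add s ((p.1 : Nat) : Int)) ((p.2 : Nat) : Int)))
    PySem.Dict.empty

def pvScoreA (S : Int × Int × Int) : Int :=
  if PySem.Int.mod S.2.2 2 = 1 then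
    (if S.1 > 0 then (1 : Int) else 0) + 3 * S.2.2 + 2 * S.2.1
  else
    (if S.1 > 0 then (1 : Int) else 0) + 3 * S.2.2 + 2 * S.2.1 + (if S.1 > 1 then (1 : Int) else 0)

def pvTripB (vals : List (PySem.Set Int)) : Int × Int × Int :=
  vals.foldl
    (fun (t : Int × Int × Int) s =>
      let m : Int := s.length
      if PySem.Int.mod m 2 = 1 then
        (t.1 + m, t.2.1 + 1, t.2.2 + PySem.Int.floordiv (m - 3) 2)
      else
        (t.1 + m, t.2.1, t.2.2 + PySem.Int.floordiv m 2))
    (0, 0, 0)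

def pvScoreB (n : Int) (t : Int × Int × Int) : Int :=
  let free := n - t.1
  let score := (if free > 0 then (1 : Int) else 0) + 3 * t.2.1 + 2 * t.2.2
  if PySem.Int.mod t.2.1 2 = 0 then score + (if free > 1 then 1 else 0) else score

-- ---- basic lemmas ----

theorem pv_pt_eq (P : List (Int × Int)) (k : Nat) (hk : k < P.length) : pvPt P k = P[k] := by
  unfold pvPt
  rw [PySem.List.pyGetD_natCast, List.getD_eq_getElem?_getD, List.getElem?_eq_getElem hk]
  rfl


theorem pv_mapRange_pyGetD (f : Nat → Int) (n i : Nat) (hi : i < n) :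
    PySem.List.pyGetD ((List.range n).map f) (i : Int) 0 = f i := by
  rw [PySem.List.pyGetD_natCast]
  simp [List.getD_eq_getElem?_getD, List.getElem?_range hi]


theorem pv_set_mapRange (f : Nat → Int) (n j : Nat) (v : Int) :
    ((List.range n).map f).set j v = (List.range n).map (fun x => if x = j then v else f x) := by
  apply List.ext_getElem
  · simp
  · intro k h1 h2
    simp only [List.getElem_set, List.getElem_map, List.getElem_range]
    split_ifs with h3 h4 h4 <;> first | rfl | omega


theorem pv_Ico_cons (a b : Nat) (h : a < b) : List.Ico a b = a :: List.Ico (a + 1) b := by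
  show List.range' a (b - a) = a :: List.range' (a + 1) (b - (a + 1))
  obtain ⟨k, hk⟩ : ∃ k, b - a = k + 1 := ⟨b - a - 1, by omega⟩
  rw [hk, List.range'_succ, show b - (a + 1) = k by omega]

theorem pv_pyRange_Ico (a b : Nat) :
    PySem.List.pyRange (a : Int) (b : Int) 1 = (List.Ico a b).map (fun (k : Nat) => (k : Int)) := by
  by_cases h : a < b
  · rw [PySem.List.pyRange_one_cons (show (a : Int) < b by exact_mod_cast h)]
    rw [show ((a : Int) + 1) = (((a + 1 : Nat)) : Int) by push_cast; ring]
    rw [pv_pyRange_Ico (a + 1) b]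
    rw [pv_Ico_cons a b h]
    simp
  · have hab : ¬ (a : Int) < b := by exact_mod_cast h
    have h2 : List.Ico a b = [] := by rw [List.Ico.eq_empty_iff]; omega
    simp [PySem.List.pyRange, hab, h2]
termination_by b - a


theorem pv_filter_lt_range (i n : Nat) :
    (List.range n).filter (fun j => decide (i < j)) = List.Ico (i + 1) n := by
  rw [← List.Ico.zero_bot]
  have h1 : (List.Ico 0 n).filter (fun j => decide (i < j)) = (List.Ico 0 n).filter (fun j => decide (i + 1 ≤ j)) := by
    apply List.filter_congr
    intro x _
    simp only [decide_eq_decide]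
    omega
  rw [h1, List.Ico.filter_le, Nat.zero_max]


theorem pv_mem_lex (n : Nat) (p : Nat × Nat) : p ∈ pvLex n ↔ p.1 < p.2 ∧ p.2 < n := by
  unfold pvLex
  simp only [List.mem_flatMap, List.mem_map, List.mem_filter, List.mem_range, decide_eq_true_eq]
  constructor
  · rintro ⟨i, hi, j, ⟨⟨hj, hij⟩, rfl⟩⟩
    exact ⟨hij, hj⟩
  · rintro ⟨h1, h2⟩
    exact ⟨p.1, by omega, p.2, ⟨⟨h2, h1⟩, rfl⟩⟩


theorem pv_lex_pairwise (n : Nat) : (pvLex n).Pairwise pvLexLT := by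
  unfold pvLex
  rw [List.pairwise_flatMap]
  constructor
  · intro a _
    rw [List.pairwise_map]
    have : ((List.range n).filter (fun j => decide (a < j))).Pairwise (· < ·) :=
      List.Pairwise.filter _ List.pairwise_lt_range
    exact this.imp (fun h => Or.inr ⟨rfl, h⟩)
  · apply List.Pairwise.imp_of_mem ?_ List.pairwise_lt_range
    intro a b ha hb hab x hx y hy
    obtain ⟨j, hj, rfl⟩ := List.mem_map.1 hx
    obtain ⟨k, hk, rfl⟩ := List.mem_map.1 hy
    exact Or.inl hab


-- ---- gcd / direction lemmas ----

theorem pv_gcdB_eq_gcd (a b : Int) (ha : 0 ≤ a) (hb : 0 ≤ b) : gcdB a b = Int.gcd a b := by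
  by_cases h : b = 0
  · subst h
    rw [gcdB]
    simp [Int.gcd, Int.natAbs_of_nonneg ha]
  · have hb' : 0 < b := lt_of_le_of_ne hb (Ne.symm h)
    rw [gcdB, dif_neg h]
    have hm0 : 0 ≤ PySem.Int.mod a b := PySem.Int.mod_nonneg a hb'
    have hmlt : PySem.Int.mod a b < b := PySem.Int.mod_lt a hb'
    rw [pv_gcdB_eq_gcd b (PySem.Int.mod a b) hb hm0]
    rw [PySem.Int.mod_eq_emod_of_pos hb']
    congr 1
    obtain ⟨A, rfl⟩ := Int.eq_ofNat_of_zero_le ha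
    obtain ⟨B, rfl⟩ := Int.eq_ofNat_of_zero_le hb
    rw [show ((A : Int) % (B : Int)) = ((A % B : Nat) : Int) from (Int.natCast_mod A B).symm]
    rw [Int.gcd_natCast_natCast, Int.gcd_natCast_natCast]
    rw [Nat.gcd_comm B (A % B), ← Nat.gcd_rec, Nat.gcd_comm]
termination_by b.toNat
decreasing_by
  have h1 := PySem.Int.mod_nonneg a (by omega : (0:Int) < b)
  have h2 := PySem.Int.mod_lt a (by omega : (0:Int) < b)
  omega


theorem pv_nwdLoop_eq_gcdB (a b : Int) (hb : 0 ≤ b) : nwdLoop a b = gcdB a b := by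
  by_cases h : 0 < b
  · rw [nwdLoop, if_pos h, gcdB, dif_neg (by omega : b ≠ 0)]
    exact pv_nwdLoop_eq_gcdB b (PySem.Int.mod a b) (PySem.Int.mod_nonneg a h)
  · have hb0 : b = 0 := by omega
    subst hb0
    rw [nwdLoop, if_neg (by omega), gcdB]
    simp
termination_by b.toNat
decreasing_by
  have h1 := PySem.Int.mod_nonneg a (by assumption)
  have h2 := PySem.Int.mod_lt a (by assumption)
  omega


theorem pv_nwd_eq_gcdB (a b : Int) (ha : 0 ≤ a) (hb : 0 ≤ b) : nwd a b = gcdB a b := by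
  unfold nwd
  by_cases h : a < b
  · rw [if_pos h, pv_nwdLoop_eq_gcdB b a ha, pv_gcdB_eq_gcd b a hb ha,
      pv_gcdB_eq_gcd a b ha hb, Int.gcd_comm]
  · rw [if_neg h, pv_nwdLoop_eq_gcdB a b hb]

theorem pv_gcd_abs (x y : Int) : Int.gcd |x| |y| = Int.gcd x y := by
  unfold Int.gcd
  rw [Int.natAbs_abs, Int.natAbs_abs]

theorem pv_canon_core (w z : Int × Int) (hx : z.1 < w.1) (hy : w.2 ≠ z.2) :
    pvCanon (PySem.Int.floordiv (w.1 - z.1) (nwd |w.1 - z.1| |w.2 - z.2|),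
             PySem.Int.floordiv (w.2 - z.2) (nwd |w.1 - z.1| |w.2 - z.2|)) := by
  have hΔx : 0 < w.1 - z.1 := by omega
  have hΔy : w.2 - z.2 ≠ 0 := sub_ne_zero.2 hy
  rw [pv_nwd_eq_gcdB _ _ (abs_nonneg _) (abs_nonneg _),
    pv_gcdB_eq_gcd _ _ (abs_nonneg _) (abs_nonneg _), pv_gcd_abs]
  have hgpos : 0 < Int.gcd (w.1 - z.1) (w.2 - z.2) := Int.gcd_pos_iff.2 (Or.inl (by omega))
  obtain ⟨A, hA⟩ := Int.gcd_dvd_left (w.1 - z.1) (w.2 - z.2)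
  obtain ⟨B, hB⟩ := Int.gcd_dvd_right (w.1 - z.1) (w.2 - z.2)
  set G : Int := ((Int.gcd (w.1 - z.1) (w.2 - z.2) : Nat) : Int) with hGdef
  have hgpos' : (0:Int) < G := by rw [hGdef]; exact_mod_cast hgpos
  have hAq : PySem.Int.floordiv (w.1 - z.1) G = A := by
    rw [PySem.Int.floordiv_eq_ediv_of_pos hgpos', hA, Int.mul_ediv_cancel_left _ (by omega)]
  have hBq : PySem.Int.floordiv (w.2 - z.2) G = B := by
    rw [PySem.Int.floordiv_eq_ediv_of_pos hgpos', hB, Int.mul_ediv_cancel_left _ (by omega)]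
  rw [hAq, hBq]
  refine Or.inr (Or.inr ⟨?_, ?_, ?_⟩)
  · show 0 < A
    by_contra hle
    push_neg at hle
    have h2 : G * A ≤ 0 := by nlinarith
    linarith [hA]
  · show B ≠ 0
    intro h0
    exact hΔy (by rw [hB, h0, mul_zero])
  · show Int.gcd A B = 1
    have h5 := Int.gcd_div_gcd_div_gcd (i := w.1 - z.1) (j := w.2 - z.2) hgpos
    have e1 : (w.1 - z.1) / G = A := by
      rw [hA, Int.mul_ediv_cancel_left _ (by omega)]
    have e2 : (w.2 - z.2) / G = B := by
      rw [hB, Int.mul_ediv_cancel_left _ (by omega)]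
    rw [← hGdef] at h5
    rw [e1, e2] at h5
    exact h5

theorem pv_key_core (w z : Int × Int) (hx : z.1 < w.1) (hy : w.2 ≠ z.2) :
    (PySem.Int.floordiv (w.1 - z.1) (nwd |w.1 - z.1| |w.2 - z.2|)) * (w.2 - z.2)
      = (PySem.Int.floordiv (w.2 - z.2) (nwd |w.1 - z.1| |w.2 - z.2|)) * (w.1 - z.1) := by
  have hΔx : 0 < w.1 - z.1 := by omega
  rw [pv_nwd_eq_gcdB _ _ (abs_nonneg _) (abs_nonneg _),
    pv_gcdB_eq_gcd _ _ (abs_nonneg _) (abs_nonneg _), pv_gcd_abs]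
  have hgpos : 0 < Int.gcd (w.1 - z.1) (w.2 - z.2) := Int.gcd_pos_iff.2 (Or.inl (by omega))
  obtain ⟨A, hA⟩ := Int.gcd_dvd_left (w.1 - z.1) (w.2 - z.2)
  obtain ⟨B, hB⟩ := Int.gcd_dvd_right (w.1 - z.1) (w.2 - z.2)
  set G : Int := ((Int.gcd (w.1 - z.1) (w.2 - z.2) : Nat) : Int) with hGdef
  have hgpos' : (0:Int) < G := by rw [hGdef]; exact_mod_cast hgpos
  have hAq : PySem.Int.floordiv (w.1 - z.1) G = A := by
    rw [PySem.Int.floordiv_eq_ediv_of_pos hgpos', hA, Int.mul_ediv_cancel_left _ (by omega)]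
  have hBq : PySem.Int.floordiv (w.2 - z.2) G = B := by
    rw [PySem.Int.floordiv_eq_ediv_of_pos hgpos', hB, Int.mul_ediv_cancel_left _ (by omega)]
  rw [hAq, hBq, hA, hB]
  ring

theorem pv_back_core (d1 d2 : Int) (hdx : 0 < d1) (hdy : d2 ≠ 0) (hcop : Int.gcd d1 d2 = 1)
    (w z : Int × Int) (hx : z.1 < w.1)
    (heq : d1 * (w.2 - z.2) = d2 * (w.1 - z.1)) :
    (PySem.Int.floordiv (w.1 - z.1) (nwd |w.1 - z.1| |w.2 - z.2|),
     PySem.Int.floordiv (w.2 - z.2) (nwd |w.1 - z.1| |w.2 - z.2|)) = (d1, d2) := by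
  have hΔx : 0 < w.1 - z.1 := by omega
  have hdvd : d1 ∣ (w.1 - z.1) := by
    have h1 : d1 ∣ d2 * (w.1 - z.1) := ⟨w.2 - z.2, by linear_combination -heq⟩
    have hco : IsCoprime d1 d2 := Int.isCoprime_iff_gcd_eq_one.2 hcop
    exact hco.dvd_of_dvd_mul_left h1
  obtain ⟨t, ht⟩ := hdvd
  have htpos : 0 < t := by
    by_contra hle
    push_neg at hle
    have h2 : d1 * t ≤ 0 := by nlinarith
    linarith [ht]
  have hty : w.2 - z.2 = d2 * t := by
    have h1 : d1 * (w.2 - z.2) = d1 * (d2 * t) := by rw [heq, ht]; ring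
    exact mul_left_cancel₀ (by omega) h1
  have hgt : Int.gcd (w.1 - z.1) (w.2 - z.2) = t.natAbs := by
    rw [ht, hty, Int.gcd_mul_right, hcop, one_mul]
  have hgcast : ((Int.gcd (w.1 - z.1) (w.2 - z.2) : Nat) : Int) = t := by
    rw [hgt]; exact Int.natAbs_of_nonneg (le_of_lt htpos)
  rw [pv_nwd_eq_gcdB _ _ (abs_nonneg _) (abs_nonneg _),
    pv_gcdB_eq_gcd _ _ (abs_nonneg _) (abs_nonneg _), pv_gcd_abs, hgcast]
  have e1 : PySem.Int.floordiv (w.1 - z.1) t = d1 := by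
    rw [PySem.Int.floordiv_eq_ediv_of_pos htpos, ht, Int.mul_ediv_cancel _ (by omega)]
  have e2 : PySem.Int.floordiv (w.2 - z.2) t = d2 := by
    rw [PySem.Int.floordiv_eq_ediv_of_pos htpos, hty, Int.mul_ediv_cancel _ (by omega)]
  rw [e1, e2]

theorem pv_getDir_key (u v : Int × Int) :
    (getDirection u v).1 * (u.2 - v.2) = (getDirection u v).2 * (u.1 - v.1) := by
  unfold getDirection
  by_cases h1 : u.1 = v.1
  · simp [h1]
  · by_cases h2 : u.2 = v.2
    · simp [h1, h2]
    · by_cases h3 : u.1 < v.1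
      · simp only [if_neg h1, if_neg h2, if_pos h3]
        have h5 := pv_key_core v u h3 (fun hh => h2 hh.symm)
        linarith [h5]
      · simp only [if_neg h1, if_neg h2, if_neg h3]
        exact pv_key_core u v (by omega) h2

theorem pv_dirB_eq (u v : Int × Int) : dirB u v = getDirection u v := by
  unfold dirB getDirection
  by_cases h1 : u.1 = v.1
  · simp [h1]
  · by_cases h2 : u.2 = v.2
    · simp [h1, h2]
    · by_cases h3 : u.1 > v.1
      · have h4 : ¬ u.1 < v.1 := by omega
        simp only [if_neg h1, if_neg h2, if_pos h3, if_neg h4]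
        rw [pv_nwd_eq_gcdB _ _ (abs_nonneg _) (abs_nonneg _)]
      · have h4 : u.1 < v.1 := by omega
        simp only [if_neg h1, if_neg h2, if_neg h3, if_pos h4]
        rw [pv_nwd_eq_gcdB _ _ (abs_nonneg _) (abs_nonneg _)]


theorem pv_canon (u v : Int × Int) : pvCanon (getDirection u v) := by
  unfold getDirection
  by_cases h1 : u.1 = v.1
  · simp [h1, pvCanon]
  · by_cases h2 : u.2 = v.2
    · simp [h1, h2, pvCanon]
    · by_cases h3 : u.1 < v.1
      · simp only [if_neg h1, if_neg h2, if_pos h3]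
        exact pv_canon_core v u h3 (fun hh => h2 hh.symm)
      · simp only [if_neg h1, if_neg h2, if_neg h3]
        exact pv_canon_core u v (by omega) h2


theorem pv_key_iff (d u v : Int × Int) (hC : pvCanon d) (huv : u ≠ v) :
    getDirection u v = d ↔ d.1 * u.2 - d.2 * u.1 = d.1 * v.2 - d.2 * v.1 := by
  constructor
  · intro h
    have hk := pv_getDir_key u v
    rw [h] at hk
    linear_combination hk
  · intro hk
    have hk' : d.1 * (u.2 - v.2) = d.2 * (u.1 - v.1) := by linear_combination hk
    rcases hC with h | h | hgen
    · have h1 : u.1 = v.1 := by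
        rw [h] at hk'
        simp at hk'
        linarith
      rw [h]
      simp [getDirection, h1]
    · have h2 : u.2 = v.2 := by
        rw [h] at hk'
        simp at hk'
        linarith
      have h1 : u.1 ≠ v.1 := fun hh => huv (Prod.ext hh h2)
      rw [h]
      simp [getDirection, h1, h2]
    · obtain ⟨hdx, hdy, hcop⟩ := hgen
      have hx : u.1 ≠ v.1 := by
        intro hh
        have h5 : d.1 * (u.2 - v.2) = 0 := by rw [hk', hh]; ring
        rcases mul_eq_zero.1 h5 with h6 | h6
        · omega
        · exact huv (Prod.ext hh (by linarith))
      have hy : u.2 ≠ v.2 := by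
        intro hh
        have h5 : d.2 * (u.1 - v.1) = 0 := by rw [← hk', hh]; ring
        rcases mul_eq_zero.1 h5 with h6 | h6
        · exact hdy h6
        · exact hx (by linarith)
      unfold getDirection
      rw [if_neg hx, if_neg hy]
      by_cases h3 : u.1 < v.1
      · simp only [if_pos h3]
        have := pv_back_core d.1 d.2 hdx hdy hcop v u h3 (by linear_combination -hk')
        rw [this]
      · simp only [if_neg h3]
        have := pv_back_core d.1 d.2 hdx hdy hcop u v (by omega) hk'
        rw [this]


-- ---- class lemmas ----

theorem pv_mem_cls (n : Nat) (K : Nat → Int) (i j : Nat) :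
    j ∈ pvCls n K i ↔ j < n ∧ K j = K i := by
  unfold pvCls
  simp only [List.mem_filter, List.mem_range, beq_iff_eq]


theorem pv_mem_cls_self (n : Nat) (K : Nat → Int) (i : Nat) (hi : i < n) : i ∈ pvCls n K i := by
  exact (pv_mem_cls n K i i).2 ⟨hi, rfl⟩


theorem pv_cls_congr (n : Nat) (K : Nat → Int) (i j : Nat) (h : K i = K j) :
    pvCls n K i = pvCls n K j := by
  unfold pvCls
  exact List.filter_congr (fun x _ => by rw [h])


theorem pv_mn_mem (n : Nat) (K : Nat → Int) (i : Nat) (hi : i < n) : pvMn n K i ∈ pvCls n K i := by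
  have hne : pvCls n K i ≠ [] := List.ne_nil_of_mem (pv_mem_cls_self n K i hi)
  unfold pvMn
  cases hc : pvCls n K i with
  | nil => exact absurd hc hne
  | cons a t => simp


theorem pv_mn_le (n : Nat) (K : Nat → Int) (i j : Nat) (hj : j ∈ pvCls n K i) : pvMn n K i ≤ j := by
  have hp : (pvCls n K i).Pairwise (· < ·) := List.Pairwise.filter _ List.pairwise_lt_range
  unfold pvMn
  cases hc : pvCls n K i with
  | nil => rw [hc] at hj; simp at hj
  | cons a t =>
    rw [hc] at hj hp
    simp only [List.headD_cons]
    rcases List.mem_cons.1 hj with rfl | hj2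
    · exact le_refl _
    · exact le_of_lt ((List.pairwise_cons.1 hp).1 j hj2)


theorem pv_mn_congr (n : Nat) (K : Nat → Int) (i j : Nat) (h : K i = K j) (hi : i < n) :
    pvMn n K i = pvMn n K j := by
  unfold pvMn
  rw [pv_cls_congr n K i j h]
  have hne : pvCls n K j ≠ [] := List.ne_nil_of_mem ((pv_mem_cls n K j i).2 ⟨hi, h⟩)
  cases hc : pvCls n K j with
  | nil => exact absurd hc hne
  | cons a t => simp

theorem pv_mem_flt (n : Nat) (K : Nat → Int) (p : Nat × Nat) :
    p ∈ pvFlt n K ↔ p.1 < p.2 ∧ p.2 < n ∧ K p.1 = K p.2 := by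
  unfold pvFlt
  simp only [List.mem_filter, pv_mem_lex, beq_iff_eq]
  tauto


theorem pv_flt_pairwise (n : Nat) (K : Nat → Int) : (pvFlt n K).Pairwise pvLexLT := by
  exact List.Pairwise.filter _ (pv_lex_pairwise n)


theorem pv_sum_delta (n m c : Nat) (hm : m < n) :
    ((List.range n).map (fun i => if i = m then c else 0)).sum = c := by
  induction n with
  | zero => omega
  | succ k ih =>
    rw [List.range_succ, List.map_append, List.sum_append]
    by_cases h : m = k
    · subst h
      have h0 : ((List.range m).map (fun i => if i = m then c else 0)).sum = 0 := by
        apply List.sum_eq_zero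
        intro x hx
        obtain ⟨i, hi, rfl⟩ := List.mem_map.1 hx
        rw [if_neg (by have := List.mem_range.1 hi; omega)]
      rw [h0]
      simp
    · have hm' : m < k := by omega
      rw [ih hm']
      simp [Ne.symm h]

theorem pv_countP_flt_fst (n : Nat) (K : Nat → Int) (m : Nat) (hm : m < n) (hmn : pvMn n K m = m) :
    (pvFlt n K).countP (fun p => p.1 == m) = pvCnt n K m - 1 := by
  have h1 : (pvFlt n K).countP (fun p => p.1 == m)
      = (pvLex n).countP (fun p => (p.1 == m) && (K p.1 == K p.2)) := by
    unfold pvFlt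
    rw [List.countP_filter]
  rw [h1]
  unfold pvLex
  rw [List.countP_flatMap]
  have hbs : ∀ (x y : Int), (x == y) = (y == x) := by
    intro x y
    by_cases h : x = y
    · simp [h]
    · simp [h, Ne.symm h]
  have h2 : ∀ i ∈ List.range n,
      ((List.countP (fun p => (p.1 == m) && (K p.1 == K p.2)) ∘
        (fun i => ((List.range n).filter (fun j => decide (i < j))).map (fun j => (i, j)))) i)
      = ((fun i => if i = m then ((List.Ico (m+1) n).filter (fun j => K j == K m)).length else 0) i) := by
    intro i _
    simp only [Function.comp_apply]
    rw [List.countP_map]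
    by_cases him : i = m
    · rw [if_pos him, him, pv_filter_lt_range, List.countP_eq_length_filter]
      congr 1
      apply List.filter_congr
      intro j _
      show ((fun p => (p.1 == m) && (K p.1 == K p.2)) ∘ (fun j => (m, j))) j = (K j == K m)
      simp only [Function.comp_apply, beq_self_eq_true, Bool.true_and]
      exact hbs _ _
    · rw [if_neg him]
      apply List.countP_eq_zero.2
      intro a _
      simp [him]
  rw [List.map_congr_left h2, pv_sum_delta n m _ hm]
  have h3 : pvCnt n K m = 1 + ((List.Ico (m+1) n).filter (fun j => K j == K m)).length := by
    unfold pvCnt pvCls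
    rw [← List.Ico.zero_bot, ← List.Ico.append_consecutive (Nat.zero_le m) (le_of_lt hm),
      List.filter_append]
    have h4 : (List.Ico 0 m).filter (fun j => K j == K m) = [] := by
      rw [List.filter_eq_nil_iff]
      intro a ha hKa
      have ham : a ∈ pvCls n K m := by
        refine (pv_mem_cls n K m a).2 ⟨?_, beq_iff_eq.1 hKa⟩
        have := (List.Ico.mem.1 ha).2
        omega
      have h5 := pv_mn_le n K m a ham
      rw [hmn] at h5
      have h6 := (List.Ico.mem.1 ha).2
      omega
    rw [h4, List.nil_append, pv_Ico_cons m n hm, List.filter_cons, if_pos (by simp : ((K m == K m) = true))]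
    simp [List.length_cons]
    omega
  omega


-- ---- chain invariant for A's get_lines ----

theorem pv_two_le {α : Type} (l : List α) (hnd : l.Nodup) (a b : α)
    (ha : a ∈ l) (hb : b ∈ l) (hab : a ≠ b) : 2 ≤ l.length := by
  cases l with
  | nil => simp at ha
  | cons x t =>
    cases t with
    | nil =>
      simp at ha hb
      exact absurd (ha.trans hb.symm) hab
    | cons y s => simp only [List.length_cons]; omega

theorem pv_exists_second {α : Type} (l : List α) (hnd : l.Nodup) (a : α)
    (ha : a ∈ l) (hlen : 2 ≤ l.length) : ∃ b ∈ l, b ≠ a := by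
  cases l with
  | nil => simp at ha
  | cons x t =>
    cases t with
    | nil => simp at hlen
    | cons y s =>
      by_cases hxa : x = a
      · refine ⟨y, by simp, ?_⟩
        intro hya
        exact (List.nodup_cons.1 hnd).1 (by rw [hxa, ← hya]; exact List.mem_cons_self)
      · exact ⟨x, by simp, hxa⟩

theorem pv_chain_step (n : Nat) (K : Nat → Int) (pre suf : List (Nat × Nat)) (p : Nat × Nat)
    (hsplit : pvFlt n K = pre ++ p :: suf) (st : List Int × PySem.Dict Int Int)
    (hinv : pvInv n K pre st) : pvInv n K (pre ++ [p]) (pvStepA st (pvIp p)) := by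
  obtain ⟨hV, hnd, hD, hDneg⟩ := hinv
  obtain ⟨i, j⟩ := p
  have hpf : (i, j) ∈ pvFlt n K := by
    rw [hsplit]; exact List.mem_append_right _ (List.mem_cons_self)
  obtain ⟨hij, hjn, hK⟩ := (pv_mem_flt n K (i, j)).1 hpf
  have hin : i < n := lt_trans hij hjn
  have hpw := pv_flt_pairwise n K
  rw [hsplit] at hpw
  obtain ⟨hpw1, hpw2, hcross⟩ := List.pairwise_append.1 hpw
  have hpre_sub : ∀ q ∈ pre, q ∈ pvFlt n K := by
    intro q hq; rw [hsplit]; exact List.mem_append_left _ hq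
  have hclosure : ∀ q ∈ pvFlt n K, pvLexLT q (i, j) → q ∈ pre := by
    intro q hq hlt
    rw [hsplit] at hq
    rcases List.mem_append.1 hq with hh | hh
    · exact hh
    · rcases List.mem_cons.1 hh with rfl | hh2
      · exfalso; unfold pvLexLT at hlt; omega
      · exfalso
        have h9 := (List.pairwise_cons.1 hpw2).1 q hh2
        unfold pvLexLT at h9 hlt
        omega
  have hKm : K (pvMn n K i) = K i := ((pv_mem_cls n K i _).1 (pv_mn_mem n K i hin)).2
  have hmn2 : pvMn n K i < n := ((pv_mem_cls n K i _).1 (pv_mn_mem n K i hin)).1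
  have hmle : pvMn n K i ≤ i := pv_mn_le n K i i (pv_mem_cls_self n K i hin)
  have hmnj : pvMn n K j = pvMn n K i := pv_mn_congr n K j i hK.symm hjn
  have hgi : PySem.List.pyGetD st.1 ((i : Nat) : Int) 0
      = (if pre.any (fun q => q.2 == i) then ((pvMn n K i : Nat) : Int) else ((i : Nat) : Int)) := by
    rw [hV]; exact pv_mapRange_pyGetD _ n i hin
  have hgj : PySem.List.pyGetD st.1 ((j : Nat) : Int) 0
      = (if pre.any (fun q => q.2 == j) then ((pvMn n K j : Nat) : Int) else ((j : Nat) : Int)) := by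
    rw [hV]; exact pv_mapRange_pyGetD _ n j hjn
  have hst1 : (pvStepA st (pvIp (i, j))).1
      = PySem.List.pySetD st.1 ((j : Nat) : Int) (PySem.List.pyGetD st.1 ((i : Nat) : Int) 0) := rfl
  have hst2 : (pvStepA st (pvIp (i, j))).2
      = (if PySem.List.pyGetD st.1 ((i : Nat) : Int) 0 ≠ PySem.List.pyGetD st.1 ((j : Nat) : Int) 0
         then st.2.modify ((i : Nat) : Int) 0 (· + 1) else st.2) := rfl
  unfold pvInv
  rw [hst1, hst2]
  by_cases hcase : pvMn n K i = i
  · -- first pair of its line: V[i] = i, V[j] = j, D[i] += 1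
    have hai : pre.any (fun q => q.2 == i) = false := by
      by_contra hcon
      rw [Bool.not_eq_false, List.any_eq_true] at hcon
      obtain ⟨q, hq, hq2⟩ := hcon
      have hq2' : q.2 = i := by simpa using hq2
      obtain ⟨ha1, ha2, ha3⟩ := (pv_mem_flt n K q).1 (hpre_sub q hq)
      have hc : q.1 ∈ pvCls n K i := (pv_mem_cls n K i q.1).2 ⟨by omega, by rw [ha3, hq2']⟩
      have := pv_mn_le n K i q.1 hc
      omega
    have haj : pre.any (fun q => q.2 == j) = false := by
      by_contra hcon
      rw [Bool.not_eq_false, List.any_eq_true] at hcon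
      obtain ⟨q, hq, hq2⟩ := hcon
      have hq2' : q.2 = j := by simpa using hq2
      obtain ⟨ha1, ha2, ha3⟩ := (pv_mem_flt n K q).1 (hpre_sub q hq)
      have hlex := hcross q hq (i, j) (List.mem_cons_self)
      unfold pvLexLT at hlex
      have hq1i : q.1 < i := by
        rcases hlex with hh | ⟨hh1, hh2⟩
        · exact hh
        · omega
      have hc : q.1 ∈ pvCls n K i := (pv_mem_cls n K i q.1).2 ⟨by omega, by rw [ha3, hq2', hK]⟩
      have := pv_mn_le n K i q.1 hc
      omega
    have hgi' : PySem.List.pyGetD st.1 ((i : Nat) : Int) 0 = ((i : Nat) : Int) := by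
      rw [hgi, hai]; simp
    have hgj' : PySem.List.pyGetD st.1 ((j : Nat) : Int) 0 = ((j : Nat) : Int) := by
      rw [hgj, haj]; simp
    rw [hgi', hgj']
    have hne : ((i : Nat) : Int) ≠ ((j : Nat) : Int) := by
      intro hh
      have : i = j := by exact_mod_cast hh
      omega
    rw [if_pos hne]
    have hgetD : st.2.getD ((i : Nat) : Int) 0 = ((pre.countP (fun q => q.1 == i) : Nat) : Int) := by
      rw [PySem.Dict.getD_eq_get?_getD, hD i]
      by_cases hc : 0 < pre.countP (fun q => q.1 == i)
      · rw [if_pos ⟨hcase, hc⟩]; rfl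
      · rw [if_neg (fun hh => hc hh.2)]
        have h0 : pre.countP (fun q => q.1 == i) = 0 := by omega
        rw [h0]; rfl
    refine ⟨?_, ?_, ?_, ?_⟩
    · rw [hV]
      unfold pvVst
      rw [PySem.List.pySetD_natCast, pv_set_mapRange]
      apply List.map_congr_left
      intro x hx
      by_cases hxj : x = j
      · subst hxj
        rw [if_pos rfl]
        have h7 : (pre ++ [(i, x)]).any (fun q => q.2 == x) = true := by
          rw [List.any_append]; simp
        rw [h7, if_pos rfl, hmnj, hcase]
      · rw [if_neg hxj]
        have h8 : [(i, j)].any (fun q => q.2 == x) = false := by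
          simp only [List.any_cons, List.any_nil, Bool.or_false]
          exact beq_eq_false_iff_ne.2 (fun hh => hxj hh.symm)
        rw [List.any_append, h8, Bool.or_false]
    · exact PySem.Dict.nodup_keys_insert st.2 _ _ hnd
    · intro m'
      show (st.2.insert ((i : Nat) : Int) (st.2.getD ((i : Nat) : Int) 0 + 1)).get? ((m' : Nat) : Int) = _
      rw [PySem.Dict.get?_insert]
      by_cases hmi : ((m' : Nat) : Int) = ((i : Nat) : Int)
      · have hmi' : m' = i := by exact_mod_cast hmi
        rw [if_pos hmi, hgetD, hmi']
        rw [List.countP_append]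
        have h8 : List.countP (fun q => q.1 == i) [(i, j)] = 1 := by simp
        rw [h8]
        rw [if_pos ⟨hcase, by omega⟩]
        norm_cast
      · have hmi' : m' ≠ i := fun hh => hmi (by exact_mod_cast hh)
        rw [if_neg hmi, hD m', List.countP_append]
        have h8 : List.countP (fun q => q.1 == m') [(i, j)] = 0 := by
          simp only [List.countP_cons, List.countP_nil]
          simp [beq_iff_eq, Ne.symm hmi']
        rw [h8, Nat.add_zero]
    · intro x hx
      show (st.2.insert ((i : Nat) : Int) (st.2.getD ((i : Nat) : Int) 0 + 1)).get? x = none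
      rw [PySem.Dict.get?_insert]
      rw [if_neg (by intro hh; have h9 : (0:Int) ≤ ((i : Nat) : Int) := Int.natCast_nonneg i; omega)]
      exact hDneg x hx
  · -- later pair of its line: V[i] = V[j] = the line minimum, nothing changes in D
    have hmlt : pvMn n K i < i := lt_of_le_of_ne hmle hcase
    have hpmi : (pvMn n K i, i) ∈ pre := by
      apply hclosure
      · exact (pv_mem_flt n K _).2 ⟨hmlt, hin, hKm⟩
      · exact Or.inl hmlt
    have hpmj : (pvMn n K i, j) ∈ pre := by
      apply hclosure
      · exact (pv_mem_flt n K _).2 ⟨by omega, hjn, by rw [hKm, hK]⟩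
      · exact Or.inl hmlt
    have hai : pre.any (fun q => q.2 == i) = true :=
      List.any_eq_true.2 ⟨(pvMn n K i, i), hpmi, by simp⟩
    have haj : pre.any (fun q => q.2 == j) = true :=
      List.any_eq_true.2 ⟨(pvMn n K i, j), hpmj, by simp⟩
    have hgi' : PySem.List.pyGetD st.1 ((i : Nat) : Int) 0 = ((pvMn n K i : Nat) : Int) := by
      rw [hgi, hai]; simp
    have hgj' : PySem.List.pyGetD st.1 ((j : Nat) : Int) 0 = ((pvMn n K i : Nat) : Int) := by
      rw [hgj, haj, hmnj]; simp
    rw [hgi', hgj', if_neg (by simp)]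
    refine ⟨?_, hnd, ?_, fun x hx => hDneg x hx⟩
    · rw [hV]
      unfold pvVst
      rw [PySem.List.pySetD_natCast, pv_set_mapRange]
      apply List.map_congr_left
      intro x hx
      by_cases hxj : x = j
      · subst hxj
        rw [if_pos rfl]
        have h7 : (pre ++ [(i, x)]).any (fun q => q.2 == x) = true := by
          rw [List.any_append]; simp
        rw [h7, if_pos rfl, hmnj]
      · rw [if_neg hxj]
        have h8 : [(i, j)].any (fun q => q.2 == x) = false := by
          simp only [List.any_cons, List.any_nil, Bool.or_false]
          exact beq_eq_false_iff_ne.2 (fun hh => hxj hh.symm)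
        rw [List.any_append, h8, Bool.or_false]
    · intro m'
      rw [hD m']
      by_cases hmm' : pvMn n K m' = m'
      · have hm'i : m' ≠ i := fun hh => hcase (by rw [← hh]; exact hmm')
        have h8 : List.countP (fun q => q.1 == m') [(i, j)] = 0 := by
          simp only [List.countP_cons, List.countP_nil]
          simp [beq_iff_eq, Ne.symm hm'i]
        rw [List.countP_append, h8, Nat.add_zero]
      · rw [if_neg (fun hh => hmm' hh.1), if_neg (fun hh => hmm' hh.1)]


theorem pv_chain_fold (n : Nat) (K : Nat → Int) (pre suf : List (Nat × Nat))
    (hsplit : pvFlt n K = pre ++ suf) (st : List Int × PySem.Dict Int Int)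
    (hinv : pvInv n K pre st) :
    pvInv n K (pvFlt n K) ((suf.map pvIp).foldl pvStepA st) := by
  induction suf generalizing pre st with
  | nil =>
    rw [List.append_nil] at hsplit
    subst hsplit
    simpa using hinv
  | cons p rest ih =>
    have hstep := pv_chain_step n K pre rest p hsplit st hinv
    have hsp2 : pvFlt n K = (pre ++ [p]) ++ rest := by rw [hsplit]; simp
    have := ih (pre ++ [p]) hsp2 (pvStepA st (pvIp p)) hstep
    simpa using this


theorem pv_chain_init (n : Nat) (K : Nat → Int) :
    pvInv n K [] (PySem.List.pyRange 0 (n : Int) 1, PySem.Dict.empty) := by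
  unfold pvInv pvVst
  refine ⟨?_, ?_, ?_, ?_⟩
  · rw [PySem.List.pyRange_zero_natCast]
    simp
  · simp [PySem.Dict.keys_empty]
  · intro m
    simp [PySem.Dict.get?_empty]
  · intro x _
    exact PySem.Dict.get?_empty x


theorem pv_final_values (n : Nat) (K : Nat → Int) (st : List Int × PySem.Dict Int Int)
    (hinv : pvInv n K (pvFlt n K) st) :
    st.2.values.Perm ((pvActive n K).map (fun m => ((pvCnt n K m : Nat) : Int) - 1)) := by
  obtain ⟨hV, hnd, hD, hDneg⟩ := hinv
  have hkeys : st.2.keys.Perm ((pvActive n K).map (fun m => ((m : Nat) : Int))) := by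
    have hnd2 : ((pvActive n K).map (fun m => ((m : Nat) : Int))).Nodup := by
      apply List.Nodup.map
      · exact fun a b hab => Nat.cast_injective hab
      · unfold pvActive
        exact List.Nodup.filter _ List.nodup_range
    rw [List.perm_ext_iff_of_nodup hnd hnd2]
    intro x
    constructor
    · intro hx
      have hsome : st.2.get? x ≠ none :=
        fun hh => ((PySem.Dict.get?_eq_none_iff_not_mem_keys st.2 x).1 hh) hx
      have hx0 : 0 ≤ x := by
        by_contra hneg
        exact hsome (hDneg x (by omega))
      obtain ⟨mN, rfl⟩ := Int.eq_ofNat_of_zero_le hx0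
      rw [hD mN] at hsome
      by_cases hcond : pvMn n K mN = mN ∧ 0 < (pvFlt n K).countP (fun p => p.1 == mN)
      · obtain ⟨hmn0, hcnt0⟩ := hcond
        rw [List.countP_eq_length_filter] at hcnt0
        obtain ⟨q, hq⟩ := List.exists_mem_of_length_pos hcnt0
        obtain ⟨hq1, hq2⟩ := List.mem_filter.1 hq
        have hq2' : q.1 = mN := by simpa using hq2
        obtain ⟨ha1, ha2, ha3⟩ := (pv_mem_flt n K q).1 hq1
        have hmNn : mN < n := by omega
        have hc2 : q.2 ∈ pvCls n K mN := (pv_mem_cls n K mN q.2).2 ⟨ha2, by rw [← hq2', ← ha3]⟩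
        have hcm : mN ∈ pvCls n K mN := pv_mem_cls_self n K mN hmNn
        have hlen2 : 2 ≤ pvCnt n K mN :=
          pv_two_le _ (List.Nodup.filter _ List.nodup_range) q.2 mN hc2 hcm (by omega)
        apply List.mem_map.2
        refine ⟨mN, ?_, rfl⟩
        unfold pvActive
        apply List.mem_filter.2
        refine ⟨List.mem_range.2 hmNn, ?_⟩
        simp only [Bool.and_eq_true, beq_iff_eq, decide_eq_true_eq]
        exact ⟨hmn0, hlen2⟩
      · rw [if_neg hcond] at hsome
        exact absurd rfl hsome
    · intro hx
      obtain ⟨mN, hmem, rfl⟩ := List.mem_map.1 hx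
      unfold pvActive at hmem
      obtain ⟨hr, hcond⟩ := List.mem_filter.1 hmem
      simp only [Bool.and_eq_true, beq_iff_eq, decide_eq_true_eq] at hcond
      obtain ⟨hmn0, hlen2⟩ := hcond
      have hmNn : mN < n := List.mem_range.1 hr
      obtain ⟨b, hbmem, hbne⟩ := pv_exists_second _ (List.Nodup.filter _ List.nodup_range) mN
        (pv_mem_cls_self n K mN hmNn) hlen2
      obtain ⟨hbn, hbK⟩ := (pv_mem_cls n K mN b).1 hbmem
      have hmb : mN < b := by
        have := pv_mn_le n K mN b hbmem
        rw [hmn0] at this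
        omega
      have hpair : (mN, b) ∈ pvFlt n K := (pv_mem_flt n K (mN, b)).2 ⟨hmb, hbn, hbK.symm⟩
      have hcpos : 0 < (pvFlt n K).countP (fun p => p.1 == mN) := by
        rw [List.countP_eq_length_filter]
        have h9 : (mN, b) ∈ (pvFlt n K).filter (fun p => p.1 == mN) :=
          List.mem_filter.2 ⟨hpair, by simp⟩
        exact List.length_pos_of_mem h9
      by_contra hnot
      have h9 := (PySem.Dict.get?_eq_none_iff_not_mem_keys st.2 _).2 hnot
      rw [hD mN, if_pos ⟨hmn0, hcpos⟩] at h9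
      simp at h9
  rw [PySem.Dict.values_eq_map_keys st.2 hnd 0]
  refine (List.Perm.map _ hkeys).trans ?_
  rw [List.map_map]
  have hval : ∀ mN ∈ pvActive n K,
      ((fun k => st.2.getD k 0) ∘ (fun m => ((m : Nat) : Int))) mN
        = ((pvCnt n K mN : Nat) : Int) - 1 := by
    intro mN hmem
    unfold pvActive at hmem
    obtain ⟨hr, hcond⟩ := List.mem_filter.1 hmem
    simp only [Bool.and_eq_true, beq_iff_eq, decide_eq_true_eq] at hcond
    obtain ⟨hmn0, hlen2⟩ := hcond
    have hmNn : mN < n := List.mem_range.1 hr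
    simp only [Function.comp_apply]
    rw [PySem.Dict.getD_eq_get?_getD, hD mN]
    have hcnt := pv_countP_flt_fst n K mN hmNn hmn0
    have hcpos : 0 < (pvFlt n K).countP (fun p => p.1 == mN) := by omega
    rw [if_pos ⟨hmn0, hcpos⟩]
    show (((pvFlt n K).countP (fun p => p.1 == mN) : Nat) : Int) = _
    rw [hcnt, Nat.cast_sub (by omega)]
    simp
  rw [List.map_congr_left hval]


-- generic: value of a dict built by a keyed modify loop (B's grouping folds)
theorem pv_getD_foldl_modify_key {κ ν α : Type} [BEq κ] [LawfulBEq κ] [DecidableEq κ]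
    (l : List α) (key : α → κ) (d0 : ν) (f : α → ν → ν) (D : PySem.Dict κ ν) (c : κ) :
    (l.foldl (fun D x => D.modify (key x) d0 (f x)) D).getD c d0 =
      (l.filter (fun x => key x == c)).foldl (fun v x => f x v) (D.getD c d0) := by
  induction l generalizing D with
  | nil => simp
  | cons x xs ih =>
    rw [List.foldl_cons, ih, List.filter_cons]
    by_cases h : key x = c
    · have hb : (key x == c) = true := beq_iff_eq.2 h
      rw [hb, if_pos rfl, List.foldl_cons]
      rw [PySem.Dict.getD_modify, if_pos h.symm, h]
    · have hb : (key x == c) = false := by simp [h]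
      rw [hb, if_neg (by simp), PySem.Dict.getD_modify, if_neg (fun hh => h hh.symm)]


-- ---- normalising the two nested pair loops to folds over pvLex ----

theorem pv_double_fold {α β : Type} (l : List α) {g : β → α → α → β} {cond : α → α → Prop}
    [inst : ∀ x y, Decidable (cond x y)] (init : β) :
    l.foldl (fun acc x => l.foldl (fun acc' y => if cond x y then acc' else g acc' x y) acc) init
      = (l.flatMap (fun x => (l.filter (fun y => decide (¬ cond x y))).map (fun y => (x, y)))).foldl
          (fun acc q => g acc q.1 q.2) init := by
  rw [List.foldl_flatMap]
  apply PySem.List.foldl_congr_mem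
  intro acc x _
  rw [List.foldl_map]
  rw [← PySem.List.foldl_ite_eq_foldl_filter (fun y => ¬ cond x y) (fun acc' y => g acc' x y) l acc]
  apply PySem.List.foldl_congr_mem
  intro acc' y _
  by_cases h : cond x y
  · rw [if_pos h, if_neg (fun hh => hh h)]
  · rw [if_neg h, if_pos h]

theorem pv_double_fold2 {β : Type} (n : Nat) {g : β → Int → Int → β} (init : β) :
    (PySem.List.pyRange 0 (n : Int) 1).foldl
      (fun acc i => (PySem.List.pyRange (i + 1) (n : Int) 1).foldl (fun acc' j => g acc' i j) acc) init
      = (pvLex n).foldl (fun acc p => g acc ((p.1 : Nat) : Int) ((p.2 : Nat) : Int)) init := by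
  rw [PySem.List.pyRange_zero_natCast]
  rw [List.foldl_map]
  unfold pvLex
  rw [List.foldl_flatMap]
  apply PySem.List.foldl_congr_mem
  intro acc i _
  rw [show ((i : Int) + 1) = (((i + 1 : Nat)) : Int) by push_cast; ring]
  rw [pv_pyRange_Ico (i + 1) n, ← pv_filter_lt_range i n]
  simp only [List.foldl_map]

theorem pv_buildA (P : List (Int × Int)) :
    (PySem.List.enumerate P).foldl
      (fun D iu =>
        (PySem.List.enumerate P).foldl
          (fun (D : PySem.Dict (Int × Int) (List (Int × Int))) jv =>
            if iu.1 ≥ jv.1 then D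
            else D.modify (getDirection iu.2 jv.2) [] (· ++ [(iu.1, jv.1)]))
          D)
      PySem.Dict.empty
    = (pvLex P.length).foldl (fun D p => D.modify (pvDirIdx P p) [] (· ++ [pvIp p]))
        PySem.Dict.empty := by
  rw [pv_double_fold (PySem.List.enumerate P)]
  have henum : PySem.List.enumerate P = (List.range P.length).map (fun (k : Nat) => ((k : Int), pvPt P k)) := by
    rw [PySem.List.enumerate_eq_map_pyRange P ((0 : Int), (0 : Int))]
    rw [show PySem.List.len P = ((P.length : Nat) : Int) from rfl]
    rw [PySem.List.pyRange_zero_natCast, List.map_map]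
    rfl
  rw [henum]
  have hlist : ((List.range P.length).map (fun (k : Nat) => ((k : Int), pvPt P k))).flatMap
      (fun x => (((List.range P.length).map (fun (k : Nat) => ((k : Int), pvPt P k))).filter
        (fun y => decide (¬ x.1 ≥ y.1))).map (fun y => (x, y)))
      = (pvLex P.length).map (fun p => (((p.1 : Int), pvPt P p.1), ((p.2 : Int), pvPt P p.2))) := by
    rw [List.flatMap_map]
    unfold pvLex
    rw [List.map_flatMap]
    congr 1
    funext i
    rw [List.filter_map, List.map_map, List.map_map]
    have hf : ((List.range P.length).filter
          ((fun y => decide (¬ ((i : Int), pvPt P i).1 ≥ y.1)) ∘ (fun (k : Nat) => ((k : Int), pvPt P k))))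
        = ((List.range P.length).filter (fun j => decide (i < j))) := by
      apply List.filter_congr
      intro j _
      simp only [Function.comp_apply, decide_eq_decide]
      omega
    rw [hf]
    rfl
  rw [hlist, List.foldl_map]
  rfl

theorem pv_buildB (P : List (Int × Int)) :
    (PySem.List.pyRange 0 (P.length : Int) 1).foldl
      (fun (G : PySem.Dict (Int × Int) (PySem.Dict Int (PySem.Set Int))) i =>
        (PySem.List.pyRange (i + 1) (P.length : Int) 1).foldl
          (fun G j =>
            let u := PySem.List.pyGetD P i ((0 : Int), (0 : Int))
            let v := PySem.List.pyGetD P j ((0 : Int), (0 : Int))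
            let d := dirB u v
            let key := d.1 * u.2 - d.2 * u.1
            let lines := G.getD d PySem.Dict.empty
            let s := lines.getD key PySem.Set.empty
            G.insert d (lines.insert key (PySem.Set.add (PySem.Set.add s i) j)))
          G)
      PySem.Dict.empty
    = (pvLex P.length).foldl
        (fun G p => G.modify (pvDirIdx P p) PySem.Dict.empty
          (fun lines => lines.insert (pvK (pvDirIdx P p) P p.1)
            (PySem.Set.add (PySem.Set.add (lines.getD (pvK (pvDirIdx P p) P p.1) PySem.Set.empty)
              ((p.1 : Nat) : Int)) ((p.2 : Nat) : Int))))
        PySem.Dict.empty := by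
  rw [pv_double_fold2 P.length]
  simp only [pv_dirB_eq]
  rfl

-- ---- per-direction support lemmas ----

theorem pv_cls_nodup (n : Nat) (K : Nat → Int) (i : Nat) : (pvCls n K i).Nodup :=
  List.Nodup.filter _ List.nodup_range

theorem pv_active_mem (n : Nat) (K : Nat → Int) (m : Nat) :
    m ∈ pvActive n K ↔ (m < n ∧ pvMn n K m = m ∧ 2 ≤ pvCnt n K m) := by
  unfold pvActive
  simp only [List.mem_filter, List.mem_range, Bool.and_eq_true, beq_iff_eq, decide_eq_true_eq]

theorem pv_active_pair (n : Nat) (K : Nat → Int) (m : Nat) (h : m ∈ pvActive n K) :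
    ∃ b, m < b ∧ b < n ∧ K b = K m := by
  obtain ⟨hm, hmn, hcnt⟩ := (pv_active_mem n K m).1 h
  obtain ⟨b, hbmem, hbne⟩ := pv_exists_second _ (pv_cls_nodup n K m) m (pv_mem_cls_self n K m hm) hcnt
  obtain ⟨hbn, hbK⟩ := (pv_mem_cls n K m b).1 hbmem
  have := pv_mn_le n K m b hbmem
  exact ⟨b, by omega, hbn, hbK⟩

theorem pv_min_active (n : Nat) (K : Nat → Int) (p : Nat × Nat) (hp : p ∈ pvFlt n K) :
    pvMn n K p.1 ∈ pvActive n K ∧ K (pvMn n K p.1) = K p.1 := by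
  obtain ⟨h1, h2, h3⟩ := (pv_mem_flt n K p).1 hp
  have h1n : p.1 < n := by omega
  obtain ⟨hmn, hKm⟩ := (pv_mem_cls n K p.1 _).1 (pv_mn_mem n K p.1 h1n)
  refine ⟨(pv_active_mem n K _).2 ⟨hmn, pv_mn_congr n K _ p.1 hKm hmn, ?_⟩, hKm⟩
  unfold pvCnt
  rw [pv_cls_congr n K _ _ hKm]
  exact pv_two_le _ (pv_cls_nodup n K p.1) p.1 p.2 (pv_mem_cls_self n K p.1 h1n)
    ((pv_mem_cls n K p.1 p.2).2 ⟨h2, h3.symm⟩) (by omega)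

theorem pv_keysK_perm (n : Nat) (K : Nat → Int) :
    (PySem.Set.ofList ((pvFlt n K).map (fun p => K p.1))).Perm ((pvActive n K).map (fun m => K m)) := by
  have hKinj : ∀ m ∈ pvActive n K, ∀ m' ∈ pvActive n K, K m = K m' → m = m' := by
    intro m hm m' hm' hKk
    obtain ⟨h1, h2, _⟩ := (pv_active_mem n K m).1 hm
    obtain ⟨h1', h2', _⟩ := (pv_active_mem n K m').1 hm'
    have h9 := pv_mn_congr n K m m' hKk h1
    rw [h2, h2'] at h9
    exact h9
  have hnd2 : ((pvActive n K).map (fun m => K m)).Nodup := by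
    apply List.Nodup.map_on hKinj
    unfold pvActive
    exact List.Nodup.filter _ List.nodup_range
  rw [List.perm_ext_iff_of_nodup (PySem.Set.nodup_ofList _) hnd2]
  intro κ
  rw [PySem.Set.mem_ofList]
  constructor
  · intro h
    obtain ⟨p, hp, rfl⟩ := List.mem_map.1 h
    obtain ⟨hact, hKm⟩ := pv_min_active n K p hp
    exact List.mem_map.2 ⟨pvMn n K p.1, hact, hKm⟩
  · intro h
    obtain ⟨m, hm, rfl⟩ := List.mem_map.1 h
    obtain ⟨b, hmb, hbn, hbK⟩ := pv_active_pair n K m hm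
    exact List.mem_map.2 ⟨(m, b), (pv_mem_flt n K (m, b)).2 ⟨hmb, hbn, hbK.symm⟩, rfl⟩

theorem pv_fold_add2 (l : List (Nat × Nat)) :
    l.foldl (fun s p => PySem.Set.add (PySem.Set.add s ((p.1 : Nat) : Int)) ((p.2 : Nat) : Int))
      PySem.Set.empty
      = PySem.Set.ofList (l.flatMap (fun p => [((p.1 : Nat) : Int), ((p.2 : Nat) : Int)])) := by
  rw [PySem.Set.ofList_eq_foldl, List.foldl_flatMap]
  rfl

theorem pv_setval_len (n : Nat) (K : Nat → Int) (m : Nat) (hact : m ∈ pvActive n K) :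
    (((pvFlt n K).filter (fun p => K p.1 == K m)).foldl
      (fun s p => PySem.Set.add (PySem.Set.add s ((p.1 : Nat) : Int)) ((p.2 : Nat) : Int))
      PySem.Set.empty).length = pvCnt n K m := by
  rw [pv_fold_add2]
  obtain ⟨hmn, hmm, hcnt⟩ := (pv_active_mem n K m).1 hact
  have hperm : (PySem.Set.ofList (((pvFlt n K).filter (fun p => K p.1 == K m)).flatMap
      (fun p => [((p.1 : Nat) : Int), ((p.2 : Nat) : Int)]))).Perm
      ((pvCls n K m).map (fun (x : Nat) => (x : Int))) := by
    rw [List.perm_ext_iff_of_nodup (PySem.Set.nodup_ofList _)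
      (List.Nodup.map (fun a b hab => Nat.cast_injective hab) (pv_cls_nodup n K m))]
    intro x
    rw [PySem.Set.mem_ofList, List.mem_flatMap]
    constructor
    · rintro ⟨p, hp, hx⟩
      obtain ⟨hp1, hp2⟩ := List.mem_filter.1 hp
      have hKp1 : K p.1 = K m := beq_iff_eq.1 hp2
      obtain ⟨h1, h2, h3⟩ := (pv_mem_flt n K p).1 hp1
      simp only [List.mem_cons, List.not_mem_nil, or_false] at hx
      rcases hx with rfl | rfl
      · exact List.mem_map.2 ⟨p.1, (pv_mem_cls n K m p.1).2 ⟨by omega, hKp1⟩, rfl⟩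
      · exact List.mem_map.2 ⟨p.2, (pv_mem_cls n K m p.2).2 ⟨h2, by rw [← h3]; exact hKp1⟩, rfl⟩
    · intro hx
      obtain ⟨c, hc, rfl⟩ := List.mem_map.1 hx
      obtain ⟨hcn, hcK⟩ := (pv_mem_cls n K m c).1 hc
      by_cases hcm : c = m
      · obtain ⟨b, hmb, hbn, hbK⟩ := pv_active_pair n K m hact
        refine ⟨(m, b), List.mem_filter.2
          ⟨(pv_mem_flt n K (m, b)).2 ⟨hmb, hbn, hbK.symm⟩, by simp⟩, ?_⟩
        rw [hcm]
        simp
      · have hmc : m < c := by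
          have := pv_mn_le n K m c hc
          omega
        exact ⟨(m, c), List.mem_filter.2
          ⟨(pv_mem_flt n K (m, c)).2 ⟨hmc, hcn, hcK.symm⟩, by simp⟩, by simp⟩
  rw [hperm.length_eq, List.length_map]
  rfl

theorem pv_sum_sub_one {α : Type} (l : List α) (f : α → Int) :
    (l.map (fun x => f x - 1)).sum = (l.map f).sum - l.length := by
  induction l with
  | nil => simp
  | cons x xs ih =>
    simp only [List.map_cons, List.sum_cons, List.length_cons, ih]
    push_cast
    ring

theorem pv_tripA (vals : List Int) : ∀ (a b : Int),
    vals.foldl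
      (fun (acc : Int × Int) line0 =>
        let line := line0 + 1
        if PySem.Int.mod line 2 = 1 then
          (acc.1 + PySem.Int.floordiv (line - 3) 2, acc.2 + 1)
        else
          (acc.1 + PySem.Int.floordiv line 2, acc.2)) (a, b)
      = (a + (vals.map (fun v => if PySem.Int.mod (v + 1) 2 = 1 then PySem.Int.floordiv (v + 1 - 3) 2
            else PySem.Int.floordiv (v + 1) 2)).sum,
         b + (vals.countP (fun v => decide (PySem.Int.mod (v + 1) 2 = 1)) : Int)) := by
  induction vals with
  | nil => intro a b; simp
  | cons x xs ih =>
    intro a b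
    by_cases h : PySem.Int.mod (x + 1) 2 = 1
    · have hb : List.foldl (fun (acc : Int × Int) line0 =>
        let line := line0 + 1
        if PySem.Int.mod line 2 = 1 then
          (acc.1 + PySem.Int.floordiv (line - 3) 2, acc.2 + 1)
        else
          (acc.1 + PySem.Int.floordiv line 2, acc.2)) (a, b) (x :: xs)
          = List.foldl (fun (acc : Int × Int) line0 =>
        let line := line0 + 1
        if PySem.Int.mod line 2 = 1 then
          (acc.1 + PySem.Int.floordiv (line - 3) 2, acc.2 + 1)
        else
          (acc.1 + PySem.Int.floordiv line 2, acc.2)) (a + PySem.Int.floordiv (x + 1 - 3) 2, b + 1) xs := by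
        rw [List.foldl_cons]
        congr 1
        simp only []
        rw [if_pos h]
      rw [hb, ih]
      have hd : (fun v => decide (PySem.Int.mod (v + 1) 2 = 1)) x = true := by
        simp only [decide_eq_true_eq]
        exact h
      simp only [List.map_cons, List.sum_cons, List.countP_cons, if_pos h, hd, if_true,
        Prod.mk.injEq]
      refine ⟨by ring, by push_cast; ring⟩
    · have hb : List.foldl (fun (acc : Int × Int) line0 =>
        let line := line0 + 1
        if PySem.Int.mod line 2 = 1 then
          (acc.1 + PySem.Int.floordiv (line - 3) 2, acc.2 + 1)
        else
          (acc.1 + PySem.Int.floordiv line 2, acc.2)) (a, b) (x :: xs)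
          = List.foldl (fun (acc : Int × Int) line0 =>
        let line := line0 + 1
        if PySem.Int.mod line 2 = 1 then
          (acc.1 + PySem.Int.floordiv (line - 3) 2, acc.2 + 1)
        else
          (acc.1 + PySem.Int.floordiv line 2, acc.2)) (a + PySem.Int.floordiv (x + 1) 2, b) xs := by
        rw [List.foldl_cons]
        congr 1
        simp only []
        rw [if_neg h]
      rw [hb, ih]
      have hd : (fun v => decide (PySem.Int.mod (v + 1) 2 = 1)) x = false := by
        simp only [decide_eq_false_iff_not]
        exact h
      simp only [List.map_cons, List.sum_cons, List.countP_cons, if_neg h, hd, if_false,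
        Bool.false_eq_true, Prod.mk.injEq]
      refine ⟨by ring, by push_cast; ring⟩

theorem pv_tripB_eq (vals : List (PySem.Set Int)) : ∀ (a b c : Int),
    vals.foldl
      (fun (t : Int × Int × Int) s =>
        let m : Int := s.length
        if PySem.Int.mod m 2 = 1 then
          (t.1 + m, t.2.1 + 1, t.2.2 + PySem.Int.floordiv (m - 3) 2)
        else
          (t.1 + m, t.2.1, t.2.2 + PySem.Int.floordiv m 2)) (a, b, c)
      = (a + (vals.map (fun s => ((s.length : Nat) : Int))).sum,
         b + (vals.countP (fun s => decide (PySem.Int.mod ((s.length : Nat) : Int) 2 = 1)) : Int),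
         c + (vals.map (fun s => if PySem.Int.mod ((s.length : Nat) : Int) 2 = 1
              then PySem.Int.floordiv (((s.length : Nat) : Int) - 3) 2
              else PySem.Int.floordiv ((s.length : Nat) : Int) 2)).sum) := by
  induction vals with
  | nil => intro a b c; simp
  | cons x xs ih =>
    intro a b c
    by_cases h : PySem.Int.mod ((x.length : Nat) : Int) 2 = 1
    · have hb : List.foldl (fun (t : Int × Int × Int) s =>
        let m : Int := s.length
        if PySem.Int.mod m 2 = 1 then
          (t.1 + m, t.2.1 + 1, t.2.2 + PySem.Int.floordiv (m - 3) 2)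
        else
          (t.1 + m, t.2.1, t.2.2 + PySem.Int.floordiv m 2)) (a, b, c) (x :: xs)
          = List.foldl (fun (t : Int × Int × Int) s =>
        let m : Int := s.length
        if PySem.Int.mod m 2 = 1 then
          (t.1 + m, t.2.1 + 1, t.2.2 + PySem.Int.floordiv (m - 3) 2)
        else
          (t.1 + m, t.2.1, t.2.2 + PySem.Int.floordiv m 2)) (a + ((x.length : Nat) : Int), b + 1,
              c + PySem.Int.floordiv (((x.length : Nat) : Int) - 3) 2) xs := by
        rw [List.foldl_cons]
        congr 1
        simp only []
        rw [if_pos h]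
      rw [hb, ih]
      have hd : (fun (s : PySem.Set Int) => decide (PySem.Int.mod ((s.length : Nat) : Int) 2 = 1)) x
          = true := by
        simp only [decide_eq_true_eq]
        exact h
      simp only [List.map_cons, List.sum_cons, List.countP_cons, if_pos h, hd, if_true,
        Prod.mk.injEq]
      refine ⟨by ring, by push_cast; ring, by ring⟩
    · have hb : List.foldl (fun (t : Int × Int × Int) s =>
        let m : Int := s.length
        if PySem.Int.mod m 2 = 1 then
          (t.1 + m, t.2.1 + 1, t.2.2 + PySem.Int.floordiv (m - 3) 2)
        else
          (t.1 + m, t.2.1, t.2.2 + PySem.Int.floordiv m 2)) (a, b, c) (x :: xs)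
          = List.foldl (fun (t : Int × Int × Int) s =>
        let m : Int := s.length
        if PySem.Int.mod m 2 = 1 then
          (t.1 + m, t.2.1 + 1, t.2.2 + PySem.Int.floordiv (m - 3) 2)
        else
          (t.1 + m, t.2.1, t.2.2 + PySem.Int.floordiv m 2)) (a + ((x.length : Nat) : Int), b,
              c + PySem.Int.floordiv ((x.length : Nat) : Int) 2) xs := by
        rw [List.foldl_cons]
        congr 1
        simp only []
        rw [if_neg h]
      rw [hb, ih]
      have hd : (fun (s : PySem.Set Int) => decide (PySem.Int.mod ((s.length : Nat) : Int) 2 = 1)) x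
          = false := by
        simp only [decide_eq_false_iff_not]
        exact h
      simp only [List.map_cons, List.sum_cons, List.countP_cons, if_neg h, hd, if_false,
        Bool.false_eq_true, Prod.mk.injEq]
      refine ⟨by ring, by push_cast; ring, by ring⟩


-- ---- per-direction score equality ----

theorem pv_per_dir (P : List (Int × Int)) (hnd : P.Nodup) (d : Int × Int) (hd : d ∈ pvDirs P) :
    pvScoreA (getLines (((pvLex P.length).filter (fun p => pvDirIdx P p == d)).map pvIp)
        (P.length : Int)) =
    pvScoreB (P.length : Int) (pvTripB (pvInner P d).values) := by
  have hC : pvCanon d := by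
    obtain ⟨p, hp, rfl⟩ := List.mem_map.1 ((PySem.Set.mem_ofList _ _).1 hd)
    exact pv_canon _ _
  have hdist : ∀ p ∈ pvLex P.length, pvPt P p.1 ≠ pvPt P p.2 := by
    intro p hp hh
    obtain ⟨h1, h2⟩ := (pv_mem_lex _ p).1 hp
    rw [pv_pt_eq P p.1 (by omega), pv_pt_eq P p.2 h2] at hh
    have h3 := (List.Nodup.getElem_inj_iff hnd).1 hh
    omega
  have hfilter : (pvLex P.length).filter (fun p => pvDirIdx P p == d)
      = pvFlt P.length (pvK d P) := by
    unfold pvFlt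
    apply List.filter_congr
    intro p hp
    have hiff : (pvDirIdx P p = d) ↔ (pvK d P p.1 = pvK d P p.2) :=
      pv_key_iff d (pvPt P p.1) (pvPt P p.2) hC (hdist p hp)
    by_cases hcb : pvDirIdx P p = d
    · simp [hcb, hiff.1 hcb]
    · have hnk : ¬ pvK d P p.1 = pvK d P p.2 := fun hh => hcb (hiff.2 hh)
      simp [hcb, hnk]
  rw [hfilter]
  have hfold := pv_chain_fold P.length (pvK d P) [] (pvFlt P.length (pvK d P)) (by simp)
      (PySem.List.pyRange 0 (P.length : Int) 1, PySem.Dict.empty)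
      (pv_chain_init P.length (pvK d P))
  have hvals := pv_final_values P.length (pvK d P) _ hfold
  have hA : getLines ((pvFlt P.length (pvK d P)).map pvIp) (P.length : Int)
      = ((P.length : Int) - (((pvFlt P.length (pvK d P)).map pvIp).foldl pvStepA
      (PySem.List.pyRange 0 (P.length : Int) 1, PySem.Dict.empty)).2.values.sum - ((((pvFlt P.length (pvK d P)).map pvIp).foldl pvStepA
      (PySem.List.pyRange 0 (P.length : Int) 1, PySem.Dict.empty)).2.size : Int),
         ((((pvFlt P.length (pvK d P)).map pvIp).foldl pvStepA
      (PySem.List.pyRange 0 (P.length : Int) 1, PySem.Dict.empty)).2.values.map (fun v => if PySem.Int.mod (v + 1) 2 = 1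
            then PySem.Int.floordiv (v + 1 - 3) 2 else PySem.Int.floordiv (v + 1) 2)).sum,
         ((((pvFlt P.length (pvK d P)).map pvIp).foldl pvStepA
      (PySem.List.pyRange 0 (P.length : Int) 1, PySem.Dict.empty)).2.values.countP (fun v => decide (PySem.Int.mod (v + 1) 2 = 1)) : Int)) := by
    simp only [getLines]
    rw [pv_tripA]
    simp only [zero_add]
    rfl
  rw [hA]
  -- transport the A components along hvals
  have h1 : (((pvFlt P.length (pvK d P)).map pvIp).foldl pvStepA
      (PySem.List.pyRange 0 (P.length : Int) 1, PySem.Dict.empty)).2.values.sum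
      = ((pvActive P.length (pvK d P)).map (fun m => ((pvCnt P.length (pvK d P) m : Nat) : Int))).sum - ((pvActive P.length (pvK d P)).length : Int) := by
    rw [List.Perm.sum_eq hvals, pv_sum_sub_one]
  have h2' : (((pvFlt P.length (pvK d P)).map pvIp).foldl pvStepA
      (PySem.List.pyRange 0 (P.length : Int) 1, PySem.Dict.empty)).2.size = (pvActive P.length (pvK d P)).length := by
    have hsz : (((pvFlt P.length (pvK d P)).map pvIp).foldl pvStepA
      (PySem.List.pyRange 0 (P.length : Int) 1, PySem.Dict.empty)).2.size = (((pvFlt P.length (pvK d P)).map pvIp).foldl pvStepA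
      (PySem.List.pyRange 0 (P.length : Int) 1, PySem.Dict.empty)).2.values.length := by
      simp [PySem.Dict.size, PySem.Dict.values]
    rw [hsz, List.Perm.length_eq hvals, List.length_map]
  have h2 : (((((pvFlt P.length (pvK d P)).map pvIp).foldl pvStepA
      (PySem.List.pyRange 0 (P.length : Int) 1, PySem.Dict.empty)).2.size : Nat) : Int) = ((pvActive P.length (pvK d P)).length : Int) := by rw [h2']
  have h3' : (((pvFlt P.length (pvK d P)).map pvIp).foldl pvStepA
      (PySem.List.pyRange 0 (P.length : Int) 1, PySem.Dict.empty)).2.values.countP (fun v => decide (PySem.Int.mod (v + 1) 2 = 1))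
      = (pvActive P.length (pvK d P)).countP (fun m => decide (PySem.Int.mod ((pvCnt P.length (pvK d P) m : Nat) : Int) 2 = 1)) := by
    rw [List.Perm.countP_eq _ hvals, List.countP_map,
      List.countP_eq_length_filter, List.countP_eq_length_filter]
    congr 1
    apply List.filter_congr
    intro m hm
    simp only [Function.comp_apply]
    rw [show ((pvCnt P.length (pvK d P) m : Nat) : Int) - 1 + 1 = ((pvCnt P.length (pvK d P) m : Nat) : Int) by ring]
  have h4 : ((((pvFlt P.length (pvK d P)).map pvIp).foldl pvStepA
      (PySem.List.pyRange 0 (P.length : Int) 1, PySem.Dict.empty)).2.values.map (fun v => if PySem.Int.mod (v + 1) 2 = 1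
        then PySem.Int.floordiv (v + 1 - 3) 2 else PySem.Int.floordiv (v + 1) 2)).sum
      = ((pvActive P.length (pvK d P)).map (fun m => if PySem.Int.mod ((pvCnt P.length (pvK d P) m : Nat) : Int) 2 = 1
          then PySem.Int.floordiv (((pvCnt P.length (pvK d P) m : Nat) : Int) - 3) 2 else PySem.Int.floordiv ((pvCnt P.length (pvK d P) m : Nat) : Int) 2)).sum := by
    rw [List.Perm.sum_eq (List.Perm.map _ hvals), List.map_map]
    congr 1
    apply List.map_congr_left
    intro m hm
    simp only [Function.comp_apply]
    rw [show ((pvCnt P.length (pvK d P) m : Nat) : Int) - 1 + 1 = ((pvCnt P.length (pvK d P) m : Nat) : Int) by ring]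
  -- the B side dictionary
  have hndI : (pvInner P d).keys.Nodup := by
    unfold pvInner
    apply PySem.Dict.nodup_keys_foldl_modify_key
    rw [PySem.Dict.keys_empty]
    exact List.nodup_nil
  have hkeysI : (pvInner P d).keys
      = PySem.Set.ofList ((pvFlt P.length (pvK d P)).map (fun p => pvK d P p.1)) := by
    unfold pvInner
    rw [hfilter, PySem.Dict.keys_foldl_modify_key, PySem.Dict.keys_empty]
    rfl
  have hinval : ∀ m : Nat, (pvInner P d).getD (pvK d P m) PySem.Set.empty
      = ((pvFlt P.length (pvK d P)).filter (fun p => pvK d P p.1 == pvK d P m)).foldl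
          (fun s p => PySem.Set.add (PySem.Set.add s ((p.1 : Nat) : Int)) ((p.2 : Nat) : Int))
          PySem.Set.empty := by
    intro m
    unfold pvInner
    rw [hfilter]
    rw [pv_getD_foldl_modify_key (pvFlt P.length (pvK d P)) (fun p => pvK d P p.1)
      PySem.Set.empty
      (fun p => fun s => PySem.Set.add (PySem.Set.add s ((p.1 : Nat) : Int)) ((p.2 : Nat) : Int))
      PySem.Dict.empty (pvK d P m)]
    rw [PySem.Dict.getD_empty]
  have hBlen : ((pvInner P d).values.map (fun s => ((s.length : Nat) : Int))).Perm
      ((pvActive P.length (pvK d P)).map (fun m => ((pvCnt P.length (pvK d P) m : Nat) : Int))) := by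
    rw [PySem.Dict.values_eq_map_keys _ hndI PySem.Set.empty, List.map_map, hkeysI]
    refine (List.Perm.map _ (pv_keysK_perm P.length (pvK d P))).trans ?_
    rw [List.map_map]
    have hpt : ∀ m ∈ (pvActive P.length (pvK d P)),
        (((fun s => ((s.length : Nat) : Int)) ∘ fun k => (pvInner P d).getD k PySem.Set.empty) ∘
          fun m => pvK d P m) m = ((pvCnt P.length (pvK d P) m : Nat) : Int) := by
      intro m hm
      simp only [Function.comp_apply]
      rw [hinval m, pv_setval_len P.length (pvK d P) m hm]
    rw [List.map_congr_left hpt]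
  have hBt : pvTripB (pvInner P d).values
      = (((pvActive P.length (pvK d P)).map (fun m => ((pvCnt P.length (pvK d P) m : Nat) : Int))).sum,
         ((pvActive P.length (pvK d P)).countP (fun m => decide (PySem.Int.mod ((pvCnt P.length (pvK d P) m : Nat) : Int) 2 = 1)) : Int),
         ((pvActive P.length (pvK d P)).map (fun m => if PySem.Int.mod ((pvCnt P.length (pvK d P) m : Nat) : Int) 2 = 1
            then PySem.Int.floordiv (((pvCnt P.length (pvK d P) m : Nat) : Int) - 3) 2 else PySem.Int.floordiv ((pvCnt P.length (pvK d P) m : Nat) : Int) 2)).sum) := by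
    unfold pvTripB
    rw [pv_tripB_eq]
    simp only [zero_add]
    refine Prod.ext ?_ (Prod.ext ?_ ?_)
    · exact List.Perm.sum_eq hBlen
    · show ((pvInner P d).values.countP
          (fun s => decide (PySem.Int.mod ((s.length : Nat) : Int) 2 = 1)) : Int) = _
      rw [show (fun (s : PySem.Set Int) => decide (PySem.Int.mod ((s.length : Nat) : Int) 2 = 1))
          = ((fun x : Int => decide (PySem.Int.mod x 2 = 1)) ∘
             (fun (s : PySem.Set Int) => ((s.length : Nat) : Int))) from rfl]
      rw [← List.countP_map, List.Perm.countP_eq _ hBlen, List.countP_map]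
      rfl
    · show ((pvInner P d).values.map (fun s => if PySem.Int.mod ((s.length : Nat) : Int) 2 = 1
          then PySem.Int.floordiv (((s.length : Nat) : Int) - 3) 2
          else PySem.Int.floordiv ((s.length : Nat) : Int) 2)).sum = _
      rw [show (fun (s : PySem.Set Int) => if PySem.Int.mod ((s.length : Nat) : Int) 2 = 1
          then PySem.Int.floordiv (((s.length : Nat) : Int) - 3) 2
          else PySem.Int.floordiv ((s.length : Nat) : Int) 2)
          = ((fun x : Int => if PySem.Int.mod x 2 = 1
              then PySem.Int.floordiv (x - 3) 2 else PySem.Int.floordiv x 2) ∘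
             (fun (s : PySem.Set Int) => ((s.length : Nat) : Int))) from rfl]
      rw [← List.map_map, List.Perm.sum_eq (List.Perm.map _ hBlen), List.map_map]
      rfl
  rw [h1, h2, h3', h4, hBt]
  simp only [pvScoreA, pvScoreB]
  rw [show (P.length : Int) - (((pvActive P.length (pvK d P)).map (fun m => ((pvCnt P.length (pvK d P) m : Nat) : Int))).sum - ((pvActive P.length (pvK d P)).length : Int)) - ((pvActive P.length (pvK d P)).length : Int)
      = (P.length : Int) - ((pvActive P.length (pvK d P)).map (fun m => ((pvCnt P.length (pvK d P) m : Nat) : Int))).sum by ring]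
  rcases PySem.Int.mod_two_eq (((pvActive P.length (pvK d P)).countP (fun m => decide (PySem.Int.mod ((pvCnt P.length (pvK d P) m : Nat) : Int) 2 = 1)) : Int))
    with h0 | h0
  · rw [if_neg (show ¬ PySem.Int.mod ((List.countP (fun m => decide (PySem.Int.mod ((pvCnt P.length (pvK d P) m : Nat) : Int) 2 = 1)) (pvActive P.length (pvK d P)) : Nat) : Int) 2 = 1 by omega), if_pos h0]
  · rw [if_pos h0, if_neg (show ¬ PySem.Int.mod ((List.countP (fun m => decide (PySem.Int.mod ((pvCnt P.length (pvK d P) m : Nat) : Int) 2 = 1)) (pvActive P.length (pvK d P)) : Nat) : Int) 2 = 0 by omega)]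


-- ---- normalisations of the two ports ----

theorem pv_solve_eq (P : List (Int × Int)) :
    solve P = (pvDirs P).foldl
      (fun out dd =>
        max out (pvScoreA (getLines
          (((pvLex P.length).filter (fun p => pvDirIdx P p == dd)).map pvIp) (P.length : Int)))) 1 := by
  simp only [solve]
  rw [pv_buildA]
  have hnodup : ((pvLex P.length).foldl
      (fun D p => D.modify (pvDirIdx P p) [] (· ++ [pvIp p])) PySem.Dict.empty).keys.Nodup := by
    apply PySem.Dict.nodup_keys_foldl_modify_key
    rw [PySem.Dict.keys_empty]
    exact List.nodup_nil
  have hkeys : ((pvLex P.length).foldl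
      (fun D p => D.modify (pvDirIdx P p) [] (· ++ [pvIp p])) PySem.Dict.empty).keys = pvDirs P := by
    rw [PySem.Dict.keys_foldl_modify_key, PySem.Dict.keys_empty]
    rfl
  rw [PySem.Dict.values_eq_map_keys _ hnodup []]
  rw [hkeys, List.foldl_map]
  apply PySem.List.foldl_congr_mem
  intro acc dd _
  have hget : ((pvLex P.length).foldl
      (fun D p => D.modify (pvDirIdx P p) [] (· ++ [pvIp p])) PySem.Dict.empty).getD dd []
      = ((pvLex P.length).filter (fun p => pvDirIdx P p == dd)).map pvIp := by
    rw [pv_getD_foldl_modify_key (pvLex P.length) (pvDirIdx P) [] (fun p => (· ++ [pvIp p]))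
      PySem.Dict.empty dd]
    rw [PySem.Dict.getD_empty]
    rw [PySem.List.foldl_append_singleton_eq_map, List.nil_append]
  rw [hget]
  unfold pvScoreA
  split_ifs with h <;> rfl


theorem pv_solve_alt_eq (P : List (Int × Int)) (hnd : P.Nodup) :
    solve_alt P = (pvDirs P).foldl
      (fun best dd =>
        max best (pvScoreB (P.length : Int) (pvTripB (pvInner P dd).values))) 1 := by
  simp only [solve_alt]
  rw [pv_buildB]
  have hnodup : ((pvLex P.length).foldl
      (fun G p => G.modify (pvDirIdx P p) PySem.Dict.empty
        (fun lines => lines.insert (pvK (pvDirIdx P p) P p.1)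
          (PySem.Set.add (PySem.Set.add (lines.getD (pvK (pvDirIdx P p) P p.1) PySem.Set.empty)
            ((p.1 : Nat) : Int)) ((p.2 : Nat) : Int)))) PySem.Dict.empty).keys.Nodup := by
    apply PySem.Dict.nodup_keys_foldl_modify_key
    rw [PySem.Dict.keys_empty]
    exact List.nodup_nil
  have hkeys : ((pvLex P.length).foldl
      (fun G p => G.modify (pvDirIdx P p) PySem.Dict.empty
        (fun lines => lines.insert (pvK (pvDirIdx P p) P p.1)
          (PySem.Set.add (PySem.Set.add (lines.getD (pvK (pvDirIdx P p) P p.1) PySem.Set.empty)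
            ((p.1 : Nat) : Int)) ((p.2 : Nat) : Int)))) PySem.Dict.empty).keys = pvDirs P := by
    rw [PySem.Dict.keys_foldl_modify_key, PySem.Dict.keys_empty]
    rfl
  rw [PySem.Dict.values_eq_map_keys _ hnodup PySem.Dict.empty]
  rw [hkeys, List.foldl_map]
  apply PySem.List.foldl_congr_mem
  intro acc dd hdd
  have hget : ((pvLex P.length).foldl
      (fun G p => G.modify (pvDirIdx P p) PySem.Dict.empty
        (fun lines => lines.insert (pvK (pvDirIdx P p) P p.1)
          (PySem.Set.add (PySem.Set.add (lines.getD (pvK (pvDirIdx P p) P p.1) PySem.Set.empty)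
            ((p.1 : Nat) : Int)) ((p.2 : Nat) : Int)))) PySem.Dict.empty).getD dd PySem.Dict.empty
      = pvInner P dd := by
    rw [pv_getD_foldl_modify_key (pvLex P.length) (pvDirIdx P) PySem.Dict.empty
      (fun p => fun lines => lines.insert (pvK (pvDirIdx P p) P p.1)
        (PySem.Set.add (PySem.Set.add (lines.getD (pvK (pvDirIdx P p) P p.1) PySem.Set.empty)
          ((p.1 : Nat) : Int)) ((p.2 : Nat) : Int)))
      PySem.Dict.empty dd]
    rw [PySem.Dict.getD_empty]
    unfold pvInner
    apply PySem.List.foldl_congr_mem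
    intro lines p hp
    have hdp : pvDirIdx P p = dd := beq_iff_eq.1 (List.mem_filter.1 hp).2
    rw [hdp]
    rfl
  rw [hget]
  rfl


-- ===== VERDICT (by name: the statement is the Claim_ definition above) =====
theorem solve_spec : Claim_equal_solve := by
  intro P _hdom hpre
  unfold Spec_solve
  rw [pv_solve_eq P, pv_solve_alt_eq P hpre]
  apply PySem.List.foldl_congr_mem
  intro acc x hx
  rw [pv_per_dir P hpre x hx]
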